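-- pv_equiv track=rewrite | github.com/ButakovBI/Algorythms-DataStructures | ML_python2024/contest00/e.py | count_coprimes
-- ===== SOURCE A (Python) =====
-- def count_coprimes(N, dividors):
--     res = N
--     m = len(dividors)
--
--     for i in range(1, 1 << m):
--         bits = bin(i).count('1')
--         prod = 1
--         for j in range(m):
--             if i & (1 << j):
--                 prod *= dividors[j]
--         if prod > N:
--             continue
--         if bits % 2 == 1:
--             res -= N // prod
--         else:
--             res += N // prod
--     return res
-- ===== SOURCE B (Python) =====
-- def count_coprimes(N, dividors):
--     # Recursive branch-and-sum over the divisor list: each divisor is either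
--     # included in the current subset (flipping the inclusion-exclusion sign)
--     # or not; a subset contributes N // prod only when prod <= N.
--     def go(ds, p, s):
--         if not ds:
--             return 0
--         q = p * ds[0]
--         t = -s
--         rest = ds[1:]
--         r = go(rest, p, s) + go(rest, q, t)
--         if q <= N:
--             r += t * (N // q)
--         return r
--     return N + go(dividors, 1, 1)
-- ===== Notes on version B (the rewrite author's own statement) =====
-- stated objective: alternative
-- what changed: Replaces the flat loop over all 2^m bitmask indices (popcount + inner index scan per mask) by a recursive include/exclude descent over the divisor list that carries the running product and sign.
import Mathlib
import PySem

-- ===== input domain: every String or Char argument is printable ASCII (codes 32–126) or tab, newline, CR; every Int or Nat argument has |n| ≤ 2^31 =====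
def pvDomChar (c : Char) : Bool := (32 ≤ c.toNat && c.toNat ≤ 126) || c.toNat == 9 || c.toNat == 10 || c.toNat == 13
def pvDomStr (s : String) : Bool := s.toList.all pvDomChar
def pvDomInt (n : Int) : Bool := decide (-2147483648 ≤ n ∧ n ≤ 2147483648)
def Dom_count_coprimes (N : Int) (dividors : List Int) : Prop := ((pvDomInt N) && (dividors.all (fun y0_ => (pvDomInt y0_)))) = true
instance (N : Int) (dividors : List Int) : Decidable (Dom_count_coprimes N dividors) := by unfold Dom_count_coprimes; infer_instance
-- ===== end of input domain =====

-- B replaces A's flat loop over all 2^m bitmask indices by a recursive include/exclude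
-- descent over the divisor list (objective: alternative decomposition, same cost).

-- ===== PORT A =====
-- inner loop 'prod = 1; for j in range(m): if i & (1 << j): prod *= dividors[j]';
-- j stays in [0, m) so 'dividors.getD j 0' is Python's dividors[j] (index always in range)
def ccProdA (dividors : List Int) (i : Int) : Int :=
  (List.range dividors.length).foldl
    (fun (prod : Int) (j : Nat) =>
      if PySem.Int.band i ((1 : Int) <<< j) ≠ 0 then prod * dividors.getD j 0 else prod) 1

-- outer loop 'for i in range(1, 1 << m)'; bits = bin(i).count('1') is the number of
-- 1-bits of i (i ≥ 1 here), i.e. PySem.Int.bitCount i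
def count_coprimes (N : Int) (dividors : List Int) : Int :=
  (PySem.List.pyRange 1 ((1 : Int) <<< dividors.length) 1).foldl
    (fun res i =>
      if ccProdA dividors i > N then res
      else if PySem.Int.bitCount i % 2 = 1 then res - PySem.Int.floordiv N (ccProdA dividors i)
      else res + PySem.Int.floordiv N (ccProdA dividors i)) N

-- ===== PORT B =====
-- go(ds, p, s): sum of contributions of all nonempty subsets of ds, given the product p
-- and inclusion-exclusion sign s accumulated so far
def ccGo (N : Int) : List Int → Int → Int → Int
  | [], _, _ => 0
  | d :: rest, p, s =>
    let q := p * d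
    let t := -s
    let r := ccGo N rest p s + ccGo N rest q t
    if q ≤ N then r + t * PySem.Int.floordiv N q else r

def count_coprimes_alt (N : Int) (dividors : List Int) : Int :=
  N + ccGo N dividors 1 1

-- ===== PRECONDITION & SPEC =====
-- Pre_ excludes exactly the inputs where Python A raises ZeroDivisionError: a zero divisor
-- together with N ≥ 0 makes A reach 'N // 0' (B raises there too).
def Pre_count_coprimes (N : Int) (dividors : List Int) : Prop :=
  ¬ ((0 : Int) ∈ dividors ∧ 0 ≤ N)
instance (N : Int) (dividors : List Int) : Decidable (Pre_count_coprimes N dividors) := by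
  unfold Pre_count_coprimes; infer_instance

def pvWitness_count_coprimes : Int × List Int := (10, [2, 3])

def Spec_count_coprimes (N : Int) (dividors : List Int) (out : Int) : Prop := out = count_coprimes_alt N dividors
instance (N : Int) (dividors : List Int) (out : Int) : Decidable (Spec_count_coprimes N dividors out) := by unfold Spec_count_coprimes; infer_instance

-- ===== CLAIM (what is proved, stated in full; the proofs are below) =====
def Claim_equal_count_coprimes : Prop := ∀ (N : Int) (dividors : List Int), Dom_count_coprimes N dividors → Pre_count_coprimes N dividors → Spec_count_coprimes N dividors (count_coprimes N dividors)

-- ===== LEMMAS AND PROOFS =====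

-- contribution of one subset: product p, sign s
def ccTerm (N p s : Int) : Int := if p ≤ N then s * PySem.Int.floordiv N p else 0

-- product of the divisors selected by the bits of i
def ccPf : Nat → List Int → Int
  | _, [] => 1
  | i, d :: ds => (if i % 2 = 1 then d else 1) * ccPf (i / 2) ds

-- (-1) ^ popcount i
def ccSg (i : Nat) : Int := if PySem.Int.bitCount (i : Int) % 2 = 1 then -1 else 1

-- the per-index contribution of A's loop body
def ccTA (N : Int) (ds : List Int) (i : Int) : Int :=
  if ccProdA ds i > N then 0
  else if PySem.Int.bitCount i % 2 = 1 then -(PySem.Int.floordiv N (ccProdA ds i))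
  else PySem.Int.floordiv N (ccProdA ds i)

-- sum of the contributions of ALL 2^|ds| subsets of ds
def ccSum (N : Int) (ds : List Int) (p s : Int) : Int :=
  ((List.range (2 ^ ds.length)).map (fun i => ccTerm N (p * ccPf i ds) (s * ccSg i))).sum

lemma ccPf_zero (ds : List Int) : ccPf 0 ds = 1 := by
  induction ds with
  | nil => rfl
  | cons d t ih => simp [ccPf, ih]

lemma ccPf_two_mul (k : Nat) (d : Int) (ds : List Int) :
    ccPf (2 * k) (d :: ds) = ccPf k ds := by
  have h1 : (2 * k) % 2 = 0 := by omega
  have h2 : (2 * k) / 2 = k := by omega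
  simp [ccPf, h1, h2]

lemma ccPf_two_mul_add_one (k : Nat) (d : Int) (ds : List Int) :
    ccPf (2 * k + 1) (d :: ds) = d * ccPf k ds := by
  have h1 : (2 * k + 1) % 2 = 1 := by omega
  have h2 : (2 * k + 1) / 2 = k := by omega
  simp [ccPf, h1, h2]

lemma ccSg_zero : ccSg 0 = 1 := by decide

lemma ccSg_two_mul (k : Nat) : ccSg (2 * k) = ccSg k := by
  rcases Nat.eq_zero_or_pos k with h | h
  · subst h; rfl
  · unfold ccSg
    rw [PySem.Int.bitCount_natCast (show 0 < 2 * k by omega)]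
    have h1 : (2 * k) % 2 = 0 := by omega
    have h2 : (2 * k) / 2 = k := by omega
    rw [h1, h2]
    simp

lemma ccSg_two_mul_add_one (k : Nat) : ccSg (2 * k + 1) = -ccSg k := by
  unfold ccSg
  rw [PySem.Int.bitCount_natCast (show 0 < 2 * k + 1 by omega)]
  have h1 : (2 * k + 1) % 2 = 1 := by omega
  have h2 : (2 * k + 1) / 2 = k := by omega
  rw [h1, h2]
  by_cases hc : PySem.Int.bitCount ((k : Nat) : Int) % 2 = 1
  · have hs : (1 + PySem.Int.bitCount ((k : Nat) : Int)) % 2 = 0 := by omega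
    simp [hc, hs]
  · have hs : (1 + PySem.Int.bitCount ((k : Nat) : Int)) % 2 = 1 := by omega
    simp [hc, hs]

-- even/odd split of a sum over range (2k)
lemma ccSum_range_two_mul (k : Nat) (f : Nat → Int) :
    ((List.range (2 * k)).map f).sum
      = ((List.range k).map (fun j => f (2 * j) + f (2 * j + 1))).sum := by
  induction k with
  | zero => rfl
  | succ n ih =>
    have h : 2 * (n + 1) = (2 * n + 1) + 1 := by omega
    rw [h, List.range_succ, List.range_succ, List.range_succ]
    simp only [List.map_append, List.sum_append, List.map_cons, List.map_nil,
      List.sum_cons, List.sum_nil]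
    rw [ih]; ring

-- the bit test in A's inner loop, in Nat form
lemma ccBand_shift (k j : Nat) :
    (PySem.Int.band (k : Int) ((1 : Int) <<< j) ≠ 0) ↔ k.testBit j := by
  have h1 : ((1 : Int) <<< j) = ((1 <<< j : Nat) : Int) := rfl
  rw [h1, PySem.Int.band_natCast, Nat.one_shiftLeft, Nat.and_two_pow]
  cases k.testBit j <;> simp

-- A's inner loop computes the product of the divisors selected by the bits of k
lemma ccProdA_eq (ds : List Int) (k : Nat) (acc : Int) :
    (List.range ds.length).foldl
      (fun (prod : Int) (j : Nat) =>
        if PySem.Int.band (k : Int) ((1 : Int) <<< j) ≠ 0 then prod * ds.getD j 0 else prod) acc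
    = acc * ccPf k ds := by
  induction ds generalizing k acc with
  | nil => simp [ccPf]
  | cons d t ih =>
    rw [List.length_cons, List.range_succ_eq_map]
    rw [List.foldl_cons, List.foldl_map]
    have hstep : ∀ (a : Int), ∀ j ∈ List.range t.length,
        (fun (prod : Int) (j : Nat) =>
          if PySem.Int.band (k : Int) ((1 : Int) <<< j) ≠ 0 then prod * (d :: t).getD j 0 else prod) a j.succ
        = (fun (prod : Int) (j : Nat) =>
          if PySem.Int.band ((k / 2 : Nat) : Int) ((1 : Int) <<< j) ≠ 0 then prod * t.getD j 0 else prod) a j := by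
      intro a j _
      simp only [Nat.succ_eq_add_one, List.getD_cons_succ]
      have hiff : (PySem.Int.band (k : Int) ((1 : Int) <<< (j + 1)) ≠ 0)
           ↔ (PySem.Int.band ((k / 2 : Nat) : Int) ((1 : Int) <<< j) ≠ 0) := by
        rw [ccBand_shift, ccBand_shift, Nat.testBit_div_two]
      by_cases hb : PySem.Int.band (k : Int) ((1 : Int) <<< (j + 1)) ≠ 0
      · rw [if_pos hb, if_pos (hiff.mp hb)]
      · rw [if_neg hb, if_neg (fun hx => hb (hiff.mpr hx))]
    rw [List.foldl_ext _ _ _ hstep, ih]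
    have hbit0 : (PySem.Int.band (k : Int) ((1 : Int) <<< (0 : Nat)) ≠ 0) ↔ k % 2 = 1 := by
      rw [ccBand_shift, Nat.testBit_zero]
      simp
    by_cases hk : k % 2 = 1
    · rw [if_pos (hbit0.mpr hk)]
      simp only [List.getD_cons_zero, ccPf, if_pos hk]
      ring
    · rw [if_neg (fun hx => hk (hbit0.mp hx))]
      simp only [ccPf, if_neg hk]
      ring

-- recurrence of the subset sum when one divisor is peeled off
lemma ccSum_cons (N : Int) (d : Int) (t : List Int) (p s : Int) :
    ccSum N (d :: t) p s = ccSum N t p s + ccSum N t (p * d) (-s) := by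
  unfold ccSum
  rw [List.length_cons, pow_succ, mul_comm ((2:Nat) ^ t.length) 2, ccSum_range_two_mul]
  have hpt : ∀ j ∈ List.range (2 ^ t.length),
      (fun j => (fun i => ccTerm N (p * ccPf i (d :: t)) (s * ccSg i)) (2 * j)
              + (fun i => ccTerm N (p * ccPf i (d :: t)) (s * ccSg i)) (2 * j + 1)) j
      = (fun j => ccTerm N (p * ccPf j t) (s * ccSg j)
              + ccTerm N ((p * d) * ccPf j t) ((-s) * ccSg j)) j := by
    intro j _
    simp only [ccPf_two_mul, ccPf_two_mul_add_one, ccSg_two_mul, ccSg_two_mul_add_one]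
    have e1 : p * (d * ccPf j t) = (p * d) * ccPf j t := by ring
    have e2 : s * -ccSg j = (-s) * ccSg j := by ring
    rw [e1, e2]
  rw [List.map_congr_left hpt, PySem.List.sum_map_add_int]

-- B's recursion computes the subset sum minus the empty subset's contribution
lemma ccGo_eq (N : Int) (ds : List Int) (p s : Int) :
    ccGo N ds p s = ccSum N ds p s - ccTerm N p s := by
  induction ds generalizing p s with
  | nil =>
    simp [ccGo, ccSum, ccPf_zero, ccSg_zero]
  | cons d t ih =>
    have hbody : ccGo N (d :: t) p s
        = ccGo N t p s + ccGo N t (p * d) (-s) + ccTerm N (p * d) (-s) := by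
      simp only [ccGo, ccTerm]
      by_cases hq : p * d ≤ N
      · rw [if_pos hq, if_pos hq]; try ring
      · rw [if_neg hq, if_neg hq]; try ring
    rw [hbody, ih, ih, ccSum_cons]
    ring

-- A's per-index contribution in closed form
lemma ccTA_eq (N : Int) (ds : List Int) (n : Nat) :
    ccTA N ds ((n : Nat) : Int) = ccTerm N (ccPf n ds) (ccSg n) := by
  unfold ccTA ccTerm ccSg
  rw [show ccProdA ds ((n : Nat) : Int) = ccPf n ds from by
    unfold ccProdA; rw [ccProdA_eq]; ring]
  by_cases h1 : ccPf n ds > N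
  · rw [if_pos h1, if_neg (show ¬ ccPf n ds ≤ N by omega)]
  · rw [if_neg h1, if_pos (show ccPf n ds ≤ N by omega)]
    split_ifs <;> ring

-- A's outer loop as N plus a sum of per-index contributions
lemma ccA_eq_sum (N : Int) (ds : List Int) :
    count_coprimes N ds
      = N + ((List.range (2 ^ ds.length - 1)).map
          (fun k => ccTerm N (ccPf (k + 1) ds) (ccSg (k + 1)))).sum := by
  unfold count_coprimes
  have hshift : ((1 : Int) <<< ds.length) = ((2 ^ ds.length : Nat) : Int) := by
    have h0 : ((1 : Int) <<< ds.length) = ((1 <<< ds.length : Nat) : Int) := rfl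
    rw [h0, Nat.one_shiftLeft]
  rw [hshift]
  have hext : ∀ (res : Int), ∀ i ∈ PySem.List.pyRange 1 ((2 ^ ds.length : Nat) : Int) 1,
      (fun res i =>
        if ccProdA ds i > N then res
        else if PySem.Int.bitCount i % 2 = 1 then res - PySem.Int.floordiv N (ccProdA ds i)
        else res + PySem.Int.floordiv N (ccProdA ds i)) res i
      = (fun res i => res + ccTA N ds i) res i := by
    intro res i _
    simp only [ccTA]
    split_ifs <;> ring
  rw [List.foldl_ext _ _ _ hext,
    PySem.List.foldl_add (PySem.List.pyRange 1 ((2 ^ ds.length : Nat) : Int) 1) (ccTA N ds) N,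
    PySem.List.pyRange_one, List.map_map]
  have hlen : (((2 ^ ds.length : Nat) : Int) - 1).toNat = 2 ^ ds.length - 1 := by
    have h1 : (1:Nat) ≤ 2 ^ ds.length := Nat.one_le_two_pow
    omega
  rw [hlen]
  congr 1
  apply congrArg
  apply List.map_congr_left
  intro k _
  simp only [Function.comp_apply]
  have hcast : (1 : Int) + (k : Int) = ((k + 1 : Nat) : Int) := by push_cast; ring
  rw [hcast, ccTA_eq]

-- the full subset sum splits as the empty subset plus the indices 1 .. 2^m - 1
lemma ccSum_split (N : Int) (ds : List Int) :
    ccSum N ds 1 1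
      = ccTerm N 1 1 + ((List.range (2 ^ ds.length - 1)).map
          (fun k => ccTerm N (ccPf (k + 1) ds) (ccSg (k + 1)))).sum := by
  unfold ccSum
  have h1 : (1:Nat) ≤ 2 ^ ds.length := Nat.one_le_two_pow
  have h : 2 ^ ds.length = (2 ^ ds.length - 1) + 1 := by omega
  rw [h, List.range_succ_eq_map, List.map_cons, List.sum_cons, List.map_map,
    ccPf_zero, ccSg_zero]
  simp [mul_one, one_mul, Function.comp_def, Nat.succ_eq_add_one]

-- ===== VERDICT (by name: the statement is the Claim_ definition above) =====
theorem count_coprimes_spec : Claim_equal_count_coprimes := by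
  intro N ds _ _
  unfold Spec_count_coprimes count_coprimes_alt
  rw [ccGo_eq, ccSum_split, ccA_eq_sum]
  try ring
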